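-- pv_equiv track=rewrite | github.com/abeaumont/competitive-programming | atcoder/abc050/d.py | f
-- ===== SOURCE A (Python) =====
-- cache = {}
--
-- M = 10**9+7
--
-- def f(i):
--     if i == 0: return 0
--     if i == 1: return 1
--     if i in cache: return cache[i]
--     k = i//2
--     if i % 2 == 0: cache[i] = 2*f(k)%M + f(k-1)%M
--     else: cache[i] = 2*f(k)%M + f(k+1)%M
--     cache[i] %= M
--     return cache[i]
-- ===== SOURCE B (Python) =====
-- M = 10 ** 9 + 7
--
-- def f(i):
--     if i == 0:
--         return 0
--     a, b, c = 0, 1, 2  # (f(m-1), f(m), f(m+1)) for prefix m = 1 of i's binary digits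
--     for d in bin(i)[3:]:  # digits of i after the leading 1, high to low
--         if d == '0':
--             a, b, c = (2 * a + b) % M, (2 * b + a) % M, (2 * b + c) % M
--         else:
--             a, b, c = (2 * b + a) % M, (2 * b + c) % M, (2 * c + b) % M
--     return b
-- ===== Notes on version B (the rewrite author's own statement) =====
-- stated objective: alternative
-- what changed: Replaces the memoized top-down recursion with an iterative fast-doubling loop over the binary digits of i below the leading bit, maintaining the sliding triple of the three consecutive sequence values around the growing bit-prefix, reduced modulo the same prime; no cache, no recursion.
import Mathlib
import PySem

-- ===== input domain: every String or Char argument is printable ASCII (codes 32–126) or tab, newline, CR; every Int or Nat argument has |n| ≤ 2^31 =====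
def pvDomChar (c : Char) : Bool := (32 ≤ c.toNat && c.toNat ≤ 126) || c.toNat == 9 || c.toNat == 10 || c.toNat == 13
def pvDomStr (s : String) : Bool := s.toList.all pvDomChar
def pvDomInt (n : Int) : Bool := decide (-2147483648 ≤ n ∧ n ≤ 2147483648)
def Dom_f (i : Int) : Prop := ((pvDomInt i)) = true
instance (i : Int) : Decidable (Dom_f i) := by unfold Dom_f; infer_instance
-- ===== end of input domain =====

-- B replaces A's cached recursion by an iterative fast-doubling walk over i's binary digits
-- (an alternative of similar cost, recursion- and cache-free); return values only —
-- A also fills the module-level dict `cache` as a side effect, which B does not.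

-- ===== PORT A =====
def pvM : Int := 10 ^ 9 + 7

-- Python's `cache` is a module-level dict shared across calls; the port threads it through the
-- recursion and starts each top-level call from the empty dict (memoization never changes a value).
-- fuel = i+1 steps always suffice (each recursive call strictly decreases i); the fuel
-- parameter only makes the recursion structural, it never changes a value reached from f.
def fAux : Nat → PySem.Dict Int Int → Int → Int × PySem.Dict Int Int
  | 0, cache, _ => (0, cache)  -- never reached from f (fuel > i ≥ 0)
  | fuel + 1, cache, i =>
    if i = 0 then (0, cache)
    else if i = 1 then (1, cache)
    else if i < 0 then (0, cache)  -- totality guard: Python recurses forever (RecursionError) here; excluded by Pre_f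
    else
      match PySem.Dict.get? cache i with
      | some v => (v, cache)
      | none =>
        let k := PySem.Int.floordiv i 2
        if PySem.Int.mod i 2 = 0 then
          let r1 := fAux fuel cache k
          let r2 := fAux fuel r1.2 (k - 1)
          let v := (2 * r1.1 % pvM + r2.1 % pvM) % pvM
          (v, PySem.Dict.insert r2.2 i v)
        else
          let r1 := fAux fuel cache k
          let r2 := fAux fuel r1.2 (k + 1)
          let v := (2 * r1.1 % pvM + r2.1 % pvM) % pvM
          (v, PySem.Dict.insert r2.2 i v)

def f (i : Int) : Int := (fAux (i.toNat + 1) PySem.Dict.empty i).1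

-- ===== PORT B =====
def pvMb : Int := 1000000007

-- binary digits of n, most significant first (bin(n)[2:] for n > 0)
def binDigits : Nat → List Char
  | 0 => []
  | 1 => ['1']
  | n + 2 => binDigits ((n + 2) / 2) ++ [if (n + 2) % 2 = 1 then '1' else '0']
decreasing_by omega

def stepTriple (st : Int × Int × Int) (d : Char) : Int × Int × Int :=
  let (a, b, c) := st
  if d = '0' then
    (PySem.Int.mod (2 * a + b) pvMb, PySem.Int.mod (2 * b + a) pvMb, PySem.Int.mod (2 * b + c) pvMb)
  else
    (PySem.Int.mod (2 * b + a) pvMb, PySem.Int.mod (2 * b + c) pvMb, PySem.Int.mod (2 * c + b) pvMb)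

def f_alt (i : Int) : Int :=
  if i = 0 then 0
  else (((binDigits i.toNat).drop 1).foldl stepTriple (0, 1, 2)).2.1

-- ===== PRECONDITION & SPEC =====
-- Pre_f excludes negative i, on which Python's A recurses forever (RecursionError).
def Pre_f (i : Int) : Prop := 0 ≤ i
instance (i : Int) : Decidable (Pre_f i) := by unfold Pre_f; infer_instance
def pvWitness_f : Int := (5)

def Spec_f (i : Int) (out : Int) : Prop := out = f_alt i
instance (i : Int) (out : Int) : Decidable (Spec_f i out) := by unfold Spec_f; infer_instance

-- ===== CLAIM (what is proved, stated in full; the proofs are below) =====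
def Claim_equal_f : Prop := ∀ (i : Int), Dom_f i → Pre_f i → Spec_f i (f i)

-- ===== LEMMAS AND PROOFS =====

-- gP: the cache-free value of A's recursion (proof helper only)
def gP (i : Int) : Int :=
  if i = 0 then 0
  else if i = 1 then 1
  else if i < 0 then 0
  else
    let k := PySem.Int.floordiv i 2
    if PySem.Int.mod i 2 = 0 then
      (2 * gP k % pvM + gP (k - 1) % pvM) % pvM
    else
      (2 * gP k % pvM + gP (k + 1) % pvM) % pvM
termination_by i.toNat
decreasing_by
  all_goals
    simp only [PySem.Int.floordiv_eq_ediv_of_pos (show (0:Int) < 2 by norm_num),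
               PySem.Int.mod_eq_emod_of_pos (show (0:Int) < 2 by norm_num)] at *
    omega

-- the memo dict only ever holds correct values of gP
def ValidCache (c : PySem.Dict Int Int) : Prop :=
  ∀ (j v : Int), PySem.Dict.get? c j = some v → v = gP j

theorem fAux_correct (fuel : Nat) : ∀ (i : Int) (c : PySem.Dict Int Int), i.toNat < fuel → ValidCache c →
    (fAux fuel c i).1 = gP i ∧ ValidCache (fAux fuel c i).2 := by
  induction fuel with
  | zero => intro i c hle hv; omega
  | succ n ih =>
    intro i c hle hv
    by_cases h0 : i = 0
    · rw [fAux, gP]; simp [h0, hv]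
    · by_cases h1 : i = 1
      · rw [fAux, gP]; simp [h1, hv]
      · by_cases hneg : i < 0
        · rw [fAux, gP]
          rw [if_neg h0, if_neg h1, if_pos hneg, if_neg h0, if_neg h1, if_pos hneg]
          exact ⟨rfl, hv⟩
        · -- i ≥ 2
          have hi2 : 2 ≤ i := by omega
          rw [fAux]
          rw [if_neg h0, if_neg h1, if_neg hneg]
          cases hget : PySem.Dict.get? c i with
          | some v =>
            exact ⟨(hv i v hget).symm ▸ (hv i v hget), hv⟩
          | none =>
            have hkediv : PySem.Int.floordiv i 2 = i / 2 :=
              PySem.Int.floordiv_eq_ediv_of_pos (by norm_num)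
            have hmede : PySem.Int.mod i 2 = i % 2 :=
              PySem.Int.mod_eq_emod_of_pos (by norm_num)
            have hk1 : (PySem.Int.floordiv i 2).toNat < n := by rw [hkediv]; omega
            have hk2 : (PySem.Int.floordiv i 2 - 1).toNat < n := by rw [hkediv]; omega
            by_cases hmod : PySem.Int.mod i 2 = 0
            · rw [if_pos hmod]
              obtain ⟨e1, v1⟩ := ih (PySem.Int.floordiv i 2) c hk1 hv
              obtain ⟨e2, v2⟩ := ih (PySem.Int.floordiv i 2 - 1) _ hk2 v1
              constructor
              · rw [gP, if_neg h0, if_neg h1, if_neg hneg, if_pos hmod]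
                simp only [e1, e2]
              · intro j w hj
                rw [PySem.Dict.get?_insert] at hj
                by_cases hji : j = i
                · rw [if_pos hji] at hj
                  cases hj
                  rw [hji, gP, if_neg h0, if_neg h1, if_neg hneg, if_pos hmod]
                  simp only [e1, e2]
                · rw [if_neg hji] at hj
                  exact v2 j w hj
            · rw [if_neg hmod]
              have hodd : i % 2 = 1 := by rw [hmede] at hmod; omega
              have hk3 : (PySem.Int.floordiv i 2 + 1).toNat < n := by
                rw [hkediv]; omega
              obtain ⟨e1, v1⟩ := ih (PySem.Int.floordiv i 2) c hk1 hv
              obtain ⟨e2, v2⟩ := ih (PySem.Int.floordiv i 2 + 1) _ hk3 v1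
              constructor
              · rw [gP, if_neg h0, if_neg h1, if_neg hneg, if_neg hmod]
                simp only [e1, e2]
              · intro j w hj
                rw [PySem.Dict.get?_insert] at hj
                by_cases hji : j = i
                · rw [if_pos hji] at hj
                  cases hj
                  rw [hji, gP, if_neg h0, if_neg h1, if_neg hneg, if_neg hmod]
                  simp only [e1, e2]
                · rw [if_neg hji] at hj
                  exact v2 j w hj

theorem f_eq_gP (i : Int) : f i = gP i := by
  have hv : ValidCache PySem.Dict.empty := by
    intro j v hj
    simp [PySem.Dict.get?_empty] at hj
  exact (fAux_correct (i.toNat + 1) i PySem.Dict.empty (by omega) hv).1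

theorem mod_pos_eq (a : Int) : PySem.Int.mod a pvMb = a % 1000000007 := by
  rw [PySem.Int.mod_eq_emod_of_pos (by norm_num [pvMb])]; norm_num [pvMb]

theorem gP_zero : gP 0 = 0 := by rw [gP]; norm_num

theorem gP_one : gP 1 = 1 := by rw [gP]; norm_num

-- clean recurrences for gP on nonnegative arguments
theorem gP_even (m : Nat) (h : 1 ≤ m) :
    gP ((2 * m : Nat) : Int) = (2 * gP (m : Int) + gP ((m : Int) - 1)) % 1000000007 := by
  rw [gP]
  have h2 : ((2 * m : Nat) : Int) ≠ 0 := by push_cast; omega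
  have h3 : ((2 * m : Nat) : Int) ≠ 1 := by push_cast; omega
  have h4 : ¬ ((2 * m : Nat) : Int) < 0 := by push_cast; omega
  rw [if_neg h2, if_neg h3, if_neg h4]
  have hk : PySem.Int.floordiv ((2 * m : Nat) : Int) 2 = (m : Int) := by
    rw [PySem.Int.floordiv_eq_ediv_of_pos (by omega)]; push_cast; omega
  have hm : PySem.Int.mod ((2 * m : Nat) : Int) 2 = 0 := by
    rw [PySem.Int.mod_eq_emod_of_pos (by omega)]; push_cast; omega
  simp only [hk, hm, pvM]
  rw [← Int.add_emod]; norm_num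

theorem gP_odd (m : Nat) (h : 1 ≤ m) :
    gP ((2 * m + 1 : Nat) : Int) = (2 * gP (m : Int) + gP ((m : Int) + 1)) % 1000000007 := by
  rw [gP]
  have h2 : ((2 * m + 1 : Nat) : Int) ≠ 0 := by push_cast; omega
  have h3 : ((2 * m + 1 : Nat) : Int) ≠ 1 := by push_cast; omega
  have h4 : ¬ ((2 * m + 1 : Nat) : Int) < 0 := by push_cast; omega
  rw [if_neg h2, if_neg h3, if_neg h4]
  have hk : PySem.Int.floordiv ((2 * m + 1 : Nat) : Int) 2 = (m : Int) := by
    rw [PySem.Int.floordiv_eq_ediv_of_pos (by omega)]; push_cast; omega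
  have hm : PySem.Int.mod ((2 * m + 1 : Nat) : Int) 2 = 1 := by
    rw [PySem.Int.mod_eq_emod_of_pos (by omega)]; push_cast; omega
  rw [hk, hm, if_neg (by norm_num)]
  simp only [pvM]; rw [← Int.add_emod]; norm_num

theorem binDigits_ne_nil (n : Nat) (h : 1 ≤ n) : binDigits n ≠ [] := by
  match n, h with
  | 1, _ => simp [binDigits]
  | (n + 2), _ => simp [binDigits]

-- loop invariant: after consuming the digits of n after its leading 1, the triple is
-- (gP (n-1), gP n, gP (n+1))
theorem key (n : Nat) (h : 1 ≤ n) :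
    ((binDigits n).drop 1).foldl stepTriple (0, 1, 2)
      = (gP ((n : Int) - 1), gP (n : Int), gP ((n : Int) + 1)) := by
  induction n using Nat.strong_induction_on with
  | _ n ih =>
    match n, h with
    | 1, _ =>
      have h2 : gP (2 : Int) = 2 := by
        have e := gP_even 1 (by omega)
        norm_num at e
        rw [e, gP_one, gP_zero]; norm_num
      simp [binDigits, gP_zero, gP_one, h2]
    | (n + 2), _ =>
      have hm1 : 1 ≤ (n + 2) / 2 := by omega
      have hlt : (n + 2) / 2 < n + 2 := by omega
      have hIH := ih ((n + 2) / 2) hlt hm1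
      have hne := binDigits_ne_nil ((n + 2) / 2) hm1
      rw [binDigits]
      rw [List.drop_append_of_le_length (by cases hb : binDigits ((n+2)/2) with
            | nil => exact absurd hb hne
            | cons x xs => simp)]
      rw [List.foldl_append, hIH]
      set m := (n + 2) / 2 with hmdef
      by_cases hpar : (n + 2) % 2 = 1
      · -- n + 2 = 2 * m + 1, odd
        have hn : n + 2 = 2 * m + 1 := by omega
        rw [if_pos hpar]
        -- components: gP(2m), gP(2m+1), gP(2m+2)
        have c1 : gP (((n + 2 : Nat) : Int) - 1) = (2 * gP (m : Int) + gP ((m : Int) - 1)) % 1000000007 := by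
          have := gP_even m hm1
          have hcast : (((n + 2 : Nat) : Int) - 1) = ((2 * m : Nat) : Int) := by push_cast; omega
          rw [hcast, this]
        have c2 : gP ((n + 2 : Nat) : Int) = (2 * gP (m : Int) + gP ((m : Int) + 1)) % 1000000007 := by
          have := gP_odd m hm1
          have hcast : ((n + 2 : Nat) : Int) = ((2 * m + 1 : Nat) : Int) := by push_cast; omega
          rw [hcast, this]
        have c3 : gP (((n + 2 : Nat) : Int) + 1) = (2 * gP ((m : Int) + 1) + gP (m : Int)) % 1000000007 := by
          have := gP_even (m + 1) (by omega)
          have hcast : (((n + 2 : Nat) : Int) + 1) = ((2 * (m + 1) : Nat) : Int) := by push_cast; omega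
          have hcast2 : ((m + 1 : Nat) : Int) = (m : Int) + 1 := by push_cast; ring
          have hcast3 : (m : Int) + 1 - 1 = (m : Int) := by ring
          rw [hcast, this, hcast2, hcast3]
        rw [c1, c2, c3]
        simp [stepTriple, mod_pos_eq]
      · -- n + 2 = 2 * m, even
        have hn : n + 2 = 2 * m := by omega
        rw [if_neg hpar]
        have c1 : gP (((n + 2 : Nat) : Int) - 1) = (2 * gP ((m : Int) - 1) + gP (m : Int)) % 1000000007 := by
          by_cases hm2 : 2 ≤ m
          · have := gP_odd (m - 1) (by omega)
            have hcast : (((n + 2 : Nat) : Int) - 1) = ((2 * (m - 1) + 1 : Nat) : Int) := by push_cast; omega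
            have hcast2 : ((m - 1 : Nat) : Int) = (m : Int) - 1 := by omega
            have hcast3 : ((m - 1 : Nat) : Int) + 1 = (m : Int) := by omega
            rw [hcast, this, hcast3, hcast2]
          · -- m = 1 : gP(1) = 1 = (2*gP(0) + gP(1)) % M
            have hm1' : m = 1 := by omega
            have hcast : (((n + 2 : Nat) : Int) - 1) = (1 : Int) := by push_cast; omega
            rw [hcast, hm1']
            norm_num [gP_zero, gP_one]
        have c2 : gP ((n + 2 : Nat) : Int) = (2 * gP (m : Int) + gP ((m : Int) - 1)) % 1000000007 := by
          have := gP_even m hm1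
          have hcast : ((n + 2 : Nat) : Int) = ((2 * m : Nat) : Int) := by push_cast; omega
          rw [hcast, this]
        have c3 : gP (((n + 2 : Nat) : Int) + 1) = (2 * gP (m : Int) + gP ((m : Int) + 1)) % 1000000007 := by
          have := gP_odd m hm1
          have hcast : (((n + 2 : Nat) : Int) + 1) = ((2 * m + 1 : Nat) : Int) := by push_cast; omega
          rw [hcast, this]
        rw [c1, c2, c3]
        simp [stepTriple, mod_pos_eq]

-- ===== VERDICT (by name: the statement is the Claim_ definition above) =====
theorem f_spec : Claim_equal_f := by
  intro i _ hpre
  unfold Spec_f f_alt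
  rw [f_eq_gP]
  by_cases h0 : i = 0
  · subst h0; simp [gP_zero]
  · rw [if_neg h0]
    have h1 : 1 ≤ i.toNat := by unfold Pre_f at hpre; omega
    have hcast : ((i.toNat : Nat) : Int) = i := by unfold Pre_f at hpre; omega
    rw [key i.toNat h1, hcast]
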